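-- pv_equiv track=rewrite | github.com/Chopinsky/algo-problems | challenges/3999/3797-count-routes-to-climb-a-rectangular-grid.py | numberOfRoutes
-- ===== SOURCE A (Python) =====
-- from math import isqrt
-- from typing import List
--
-- def numberOfRoutes(grid: List[str], d: int) -> int:
--   m = len(grid[0])
--   mod = 10**9 + 7
--
--   def f(dp: List, d: int, r: str) -> List:
--     dp2 = [0]*m
--     dp2[0] = sum(dp[:d+1]) # move to 0 from prev row
--
--     for j in range(1, m):
--       dp2[j] = dp2[j-1]
--
--       if j-d-1 >= 0:
--         dp2[j] -= dp[j-d-1]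
--
--       if j+d < m:
--         dp2[j] += dp[j+d]
--
--     for j, c in enumerate(r):
--       dp2[j] = 0 if c == '#' else dp2[j]%mod
--
--     return dp2
--
--   dp = None
--   for r in grid[::-1]:
--     # vertical moves
--     if dp is None:
--       dp = f([1]*m, 0, r)
--     else:
--       dp = f(dp, isqrt(d*d-1), r)
--
--     # horizontal moves
--     dp = f(dp, d, r)
--
--   return sum(dp)%mod
-- ===== SOURCE B (Python) =====
-- from math import isqrt
-- from typing import List
--
-- def numberOfRoutes(grid: List[str], d: int) -> int:
--   m = len(grid[0])
--   mod = 10**9 + 7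
--
--   def f(dp: List, d: int, r: str) -> List:
--     # direct per-cell window sum instead of A's incremental sliding-window update
--     dp2 = [sum(dp[max(0, j - d):min(m, j + d + 1)]) for j in range(m)]
--     for j, c in enumerate(r):
--       dp2[j] = 0 if c == '#' else dp2[j] % mod
--     return dp2
--
--   rows = grid[::-1]
--   dp = f(f([1] * m, 0, rows[0]), d, rows[0])
--   for r in rows[1:]:
--     dp = f(f(dp, isqrt(d * d - 1), r), d, r)
--   return sum(dp) % mod
-- ===== Notes on version B (the rewrite author's own statement) =====
-- stated objective: alternative
-- what changed: The incremental sliding-window row update (dp2[j] from dp2[j-1] with one subtraction and one addition) is replaced by a direct per-cell range sum dp2[j] = sum(dp[max(0,j-d):min(m,j+d+1)]), and the Option-state outer loop by an explicit first-row/remaining-rows split.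
-- outside the precondition, e.g. on numberOfRoutes(['#.'], -1): A returns 1000000006, B returns 0; on numberOfRoutes(['..'], -1): A returns 0, B returns 0; on numberOfRoutes(['..', '..'], -2): A raises IndexError, B returns 0
import Mathlib
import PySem

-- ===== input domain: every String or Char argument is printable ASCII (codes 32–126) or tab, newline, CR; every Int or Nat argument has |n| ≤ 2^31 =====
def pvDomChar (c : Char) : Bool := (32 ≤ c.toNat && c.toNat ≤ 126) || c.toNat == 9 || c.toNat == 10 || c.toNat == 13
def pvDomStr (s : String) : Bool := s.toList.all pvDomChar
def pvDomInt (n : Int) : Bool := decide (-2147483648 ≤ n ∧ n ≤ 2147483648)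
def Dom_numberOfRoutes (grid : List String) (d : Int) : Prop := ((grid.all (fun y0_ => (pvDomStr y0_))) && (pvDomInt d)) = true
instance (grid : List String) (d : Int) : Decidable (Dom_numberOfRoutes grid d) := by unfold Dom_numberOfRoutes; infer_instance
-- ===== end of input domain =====

-- B replaces A's incremental sliding-window row update by a direct per-cell range-sum (and an explicit
-- first-row/rest split instead of the Option-state loop); objective: alternative (same asymptotics apart
-- from the O(m·d) inner scan, chosen for clarity), equal return values on Pre_.

-- ===== PORT A =====
-- the masking loop 'for j, c in enumerate(r): dp2[j] = 0 if c == '#' else dp2[j]%mod' — textually shared by A and B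
def pvMask (r : String) (dp2 : List Int) : List Int :=
  (PySem.List.enumerate r.toList).foldl
    (fun acc jc =>
      PySem.List.pySetD acc jc.1 (if jc.2 == '#' then 0 else PySem.Int.mod (PySem.List.pyGetD acc jc.1 0) (10^9+7)))
    dp2

-- A's 'for j in range(1, m)' loop: k = remaining iterations, prev = dp2[j-1]
def pvA_go (dp : List Int) (dd : Int) (m : Nat) : Nat → Nat → Int → List Int
  | 0, _, _ => []
  | k+1, j, prev =>
    let v := prev
      - (if 0 ≤ (j:Int) - dd - 1 then PySem.List.pyGetD dp ((j:Int) - dd - 1) 0 else 0)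
      + (if (j:Int) + dd < (m:Int) then PySem.List.pyGetD dp ((j:Int) + dd) 0 else 0)
    v :: pvA_go dp dd m k (j+1) v

-- A's helper f: dp2[0] = sum(dp[:d+1]), then the running update, then the masking loop
def pvA_f (m : Nat) (dp : List Int) (dd : Int) (r : String) : List Int :=
  let a0 := (PySem.List.slice dp none (some (dd+1))).sum
  pvMask r (a0 :: pvA_go dp dd m (m-1) 1 a0)

def numberOfRoutes (grid : List String) (d : Int) : Int :=
  let m := (PySem.Str.len ((PySem.List.pyGet? grid 0).getD "")).toNat
  let dpO := grid.reverse.foldl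
    (fun (dpO : Option (List Int)) r =>
      match dpO with
      | none => some (pvA_f m (pvA_f m (List.replicate m 1) 0 r) d r)
      | some dp => some (pvA_f m (pvA_f m dp (Int.ofNat (Nat.sqrt (d*d-1).toNat)) r) d r))
    none
  PySem.Int.mod ((dpO.getD []).sum) (10^9+7)

-- ===== PORT B =====
-- B's helper f: per-cell window sum dp2[j] = sum(dp[max(0,j-d):min(m,j+d+1)]), then the same masking loop
def pvB_f (m : Nat) (dp : List Int) (dd : Int) (r : String) : List Int :=
  pvMask r ((List.range m).map (fun (j : Nat) =>
    (PySem.List.slice dp (some (max 0 ((j:Int) - dd))) (some (min (m:Int) ((j:Int) + dd + 1)))).sum))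

def numberOfRoutes_alt (grid : List String) (d : Int) : Int :=
  let m := (PySem.Str.len ((PySem.List.pyGet? grid 0).getD "")).toNat
  match grid.reverse with
  | [] => 0
  | r0 :: rest =>
    let dp0 := pvB_f m (pvB_f m (List.replicate m 1) 0 r0) d r0
    let dpF := rest.foldl (fun dp r => pvB_f m (pvB_f m dp (Int.ofNat (Nat.sqrt (d*d-1).toNat)) r) d r) dp0
    PySem.Int.mod dpF.sum (10^9+7)

-- ===== PRECONDITION & SPEC =====
-- Pre_ keeps the function's natural domain: a non-empty grid of positive width whose rows fit the first
-- row, and a non-negative reach d (d ≠ 0 once there are ≥ 2 rows, where A's isqrt(d*d-1) raises ValueError).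
-- It excludes negative d, outside the natural domain: there A raises IndexError for every d ≤ -2 on grids of
-- width ≥ 2, and the values it does return (d = -1, or width-1 grids) arise from Python's negative-index
-- wraparound dp[j+d], an artefact of A's implementation; B returns 0 there (empty windows), which the
-- wraparound value often, but not always, happens to equal. It also excludes
-- the empty grid / width 0 / rows longer than the first row, on which A raises IndexError.
def Pre_numberOfRoutes (grid : List String) (d : Int) : Prop :=
  grid ≠ [] ∧ 1 ≤ PySem.Str.len (grid.headD "") ∧
  (∀ r ∈ grid, PySem.Str.len r ≤ PySem.Str.len (grid.headD "")) ∧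
  0 ≤ d ∧ (2 ≤ grid.length → d ≠ 0)
instance (grid : List String) (d : Int) : Decidable (Pre_numberOfRoutes grid d) := by
  unfold Pre_numberOfRoutes; infer_instance

def pvWitness_numberOfRoutes : List String × Int := (["#.", ".."], 1)

def Spec_numberOfRoutes (grid : List String) (d : Int) (out : Int) : Prop := out = numberOfRoutes_alt grid d
instance (grid : List String) (d : Int) (out : Int) : Decidable (Spec_numberOfRoutes grid d out) := by
  unfold Spec_numberOfRoutes; infer_instance

-- ===== CLAIM (what is proved, stated in full; the proofs are below) =====
def Claim_equal_numberOfRoutes : Prop := ∀ (grid : List String) (d : Int), Dom_numberOfRoutes grid d → Pre_numberOfRoutes grid d → Spec_numberOfRoutes grid d (numberOfRoutes grid d)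

-- ===== LEMMAS AND PROOFS =====

-- partial sums of dp over an index interval, reading 0 past the end
def pvG (dp : List Int) (a b : Nat) : Int := ∑ i ∈ Finset.Ico a b, dp.getD i 0

-- the canonical window value: sum of dp over [j - dN, min m (j + dN + 1))
def pvC (dp : List Int) (dN m j : Nat) : Int := pvG dp (j - dN) (min m (j + dN + 1))

lemma pv_sum_drop_take (dp : List Int) (a k : Nat) :
    ((dp.drop a).take k).sum = pvG dp a (a + k) := by
  induction k generalizing a with
  | zero => simp [pvG]
  | succ k ih =>
    by_cases h : a < dp.length
    · rw [List.drop_eq_getElem_cons h, List.take_succ_cons, List.sum_cons, ih (a+1)]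
      unfold pvG
      rw [show a + (k+1) = a + 1 + k by omega,
          Finset.sum_eq_sum_Ico_succ_bot (show a < a + 1 + k by omega) (fun i => dp.getD i 0),
          List.getD_eq_getElem dp 0 h]
    · rw [List.drop_eq_nil_of_le (by omega), List.take_nil, List.sum_nil]
      unfold pvG
      refine (Finset.sum_eq_zero ?_).symm
      intro i hi
      simp only [Finset.mem_Ico] at hi
      exact List.getD_eq_default _ _ (by omega)

lemma pvG_min_len (dp : List Int) (a b : Nat) : pvG dp a b = pvG dp a (min b dp.length) := by
  unfold pvG
  refine (Finset.sum_subset (Finset.Ico_subset_Ico le_rfl (min_le_left _ _)) ?_).symm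
  intro i hi hni
  simp only [Finset.mem_Ico] at hi hni
  exact List.getD_eq_default _ _ (by omega)

lemma pvC_step (dp : List Int) (dN m j : Nat) (hj1 : 1 ≤ j) (hjm : j < m) :
    pvC dp dN m j = pvC dp dN m (j-1)
      - (if dN + 1 ≤ j then dp.getD (j - 1 - dN) 0 else 0)
      + (if j + dN < m then dp.getD (j + dN) 0 else 0) := by
  unfold pvC pvG
  by_cases hbot : dN+1 ≤ j <;> by_cases htop : j+dN < m
  · rw [if_pos hbot, if_pos htop,
        show min m (j+dN+1) = j+dN+1 by omega,
        show min m ((j-1)+dN+1) = j+dN by omega,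
        Finset.sum_Ico_succ_top (show j-dN ≤ j+dN by omega),
        Finset.sum_eq_sum_Ico_succ_bot (show j-1-dN < j+dN by omega) (fun i => dp.getD i 0),
        show j - dN = (j-1-dN)+1 by omega]
    ring
  · rw [if_pos hbot, if_neg (by omega),
        show min m (j+dN+1) = m by omega,
        show min m ((j-1)+dN+1) = m by omega,
        Finset.sum_eq_sum_Ico_succ_bot (show j-1-dN < m by omega) (fun i => dp.getD i 0),
        show j - dN = (j-1-dN)+1 by omega]
    ring
  · rw [if_neg (by omega), if_pos htop,
        show min m (j+dN+1) = j+dN+1 by omega,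
        show min m ((j-1)+dN+1) = j+dN by omega,
        Finset.sum_Ico_succ_top (show j-dN ≤ j+dN by omega),
        show j - dN = j-1-dN by omega]
    ring
  · rw [if_neg (by omega), if_neg (by omega),
        show min m (j+dN+1) = m by omega,
        show min m ((j-1)+dN+1) = m by omega,
        show j - dN = j-1-dN by omega]
    ring

lemma pvA_go_eq (dp : List Int) (dd : Int) (m : Nat) (hd : 0 ≤ dd) :
    ∀ (k j : Nat), 1 ≤ j → j + k = m →
      pvA_go dp dd m k j (pvC dp dd.toNat m (j-1)) = (List.range' j k).map (pvC dp dd.toNat m) := by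
  intro k
  induction k with
  | zero => intro j hj hjk; simp [pvA_go]
  | succ k ih =>
    intro j hj hjk
    have hjm : j < m := by omega
    have e1 : (if 0 ≤ (j:Int) - dd - 1 then PySem.List.pyGetD dp ((j:Int) - dd - 1) 0 else 0)
        = (if dd.toNat + 1 ≤ j then dp.getD (j - 1 - dd.toNat) 0 else 0) := by
      by_cases hb : dd.toNat + 1 ≤ j
      · rw [if_pos hb, if_pos (by omega),
            show (j:Int) - dd - 1 = ((j - 1 - dd.toNat : Nat) : Int) by omega]
        exact PySem.List.pyGetD_natCast ..
      · rw [if_neg hb, if_neg (by omega)]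
    have e2 : (if (j:Int) + dd < (m:Int) then PySem.List.pyGetD dp ((j:Int) + dd) 0 else 0)
        = (if j + dd.toNat < m then dp.getD (j + dd.toNat) 0 else 0) := by
      by_cases hb : j + dd.toNat < m
      · rw [if_pos hb, if_pos (by omega),
            show (j:Int) + dd = ((j + dd.toNat : Nat) : Int) by omega]
        exact PySem.List.pyGetD_natCast ..
      · rw [if_neg hb, if_neg (by omega)]
    have hv : pvC dp dd.toNat m (j-1)
        - (if 0 ≤ (j:Int) - dd - 1 then PySem.List.pyGetD dp ((j:Int) - dd - 1) 0 else 0)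
        + (if (j:Int) + dd < (m:Int) then PySem.List.pyGetD dp ((j:Int) + dd) 0 else 0)
        = pvC dp dd.toNat m j := by
      rw [e1, e2, pvC_step dp dd.toNat m j hj hjm]
    simp only [pvA_go]
    rw [hv, List.range'_succ, List.map_cons]
    congr 1
    have := ih (j+1) (by omega) (by omega)
    simpa using this

lemma pvB_cell (dp : List Int) (dd : Int) (m j : Nat) (hd : 0 ≤ dd) (hj : j < m) :
    (PySem.List.slice dp (some (max 0 ((j:Int) - dd))) (some (min (m:Int) ((j:Int) + dd + 1)))).sum
      = pvC dp dd.toNat m j := by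
  rw [show max 0 ((j:Int) - dd) = ((j - dd.toNat : Nat) : Int) by omega,
      show min (m:Int) ((j:Int) + dd + 1) = ((min m (j + dd.toNat + 1) : Nat) : Int) by omega,
      PySem.List.slice_natCast, pv_sum_drop_take]
  unfold pvC
  congr 1
  omega

lemma pvA0 (dp : List Int) (dd : Int) (m : Nat) (hd : 0 ≤ dd) (hlen : dp.length = m) :
    (PySem.List.slice dp none (some (dd+1))).sum = pvC dp dd.toNat m 0 := by
  rw [show dd + 1 = ((dd.toNat + 1 : Nat) : Int) by omega, PySem.List.slice_to_natCast,
      show dp.take (dd.toNat + 1) = (dp.drop 0).take (dd.toNat + 1) by rw [List.drop_zero],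
      pv_sum_drop_take, pvG_min_len]
  unfold pvC
  rw [show (0:Nat) - dd.toNat = 0 from Nat.zero_sub _]
  congr 1
  omega

lemma pvf_eq (m : Nat) (dp : List Int) (dd : Int) (r : String)
    (hd : 0 ≤ dd) (hlen : dp.length = m) (hm : 1 ≤ m) :
    pvA_f m dp dd r = pvB_f m dp dd r := by
  simp only [pvA_f, pvB_f]
  congr 1
  rw [pvA0 dp dd m hd hlen,
      pvA_go_eq dp dd m hd (m-1) 1 le_rfl (by omega),
      List.map_congr_left (fun j hj => pvB_cell dp dd m j hd (List.mem_range.mp hj))]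
  obtain ⟨m', rfl⟩ : ∃ m', m = m' + 1 := ⟨m - 1, by omega⟩
  rw [List.range_eq_range', List.range'_succ, List.map_cons]
  simp

lemma pvMask_len (r : String) (l : List Int) : (pvMask r l).length = l.length := by
  unfold pvMask
  generalize PySem.List.enumerate r.toList = ps
  induction ps generalizing l with
  | nil => rfl
  | cons p ps ih => rw [List.foldl_cons, ih]; exact PySem.List.length_pySetD _ _ _

lemma pvB_f_len (m : Nat) (dp : List Int) (dd : Int) (r : String) :
    (pvB_f m dp dd r).length = m := by
  unfold pvB_f
  rw [pvMask_len]
  simp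

lemma pv_outer (m : Nat) (d : Int) (hd0 : 0 ≤ d) (hm : 1 ≤ m) :
    ∀ (rest : List String) (dpB : List Int), dpB.length = m →
      rest.foldl
        (fun (dpO : Option (List Int)) r =>
          match dpO with
          | none => some (pvA_f m (pvA_f m (List.replicate m 1) 0 r) d r)
          | some dp => some (pvA_f m (pvA_f m dp (Int.ofNat (Nat.sqrt (d*d-1).toNat)) r) d r))
        (some dpB)
      = some (rest.foldl (fun dp r => pvB_f m (pvB_f m dp (Int.ofNat (Nat.sqrt (d*d-1).toNat)) r) d r) dpB) := by
  intro rest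
  induction rest with
  | nil => intro dpB h; rfl
  | cons r rest ih =>
    intro dpB hlen
    simp only [List.foldl_cons]
    rw [pvf_eq m dpB (Int.ofNat (Nat.sqrt (d*d-1).toNat)) r (Int.natCast_nonneg _) hlen hm,
        pvf_eq m _ d r hd0 (pvB_f_len m _ _ _) hm]
    exact ih _ (pvB_f_len m _ _ _)

-- ===== VERDICT (by name: the statement is the Claim_ definition above) =====
theorem numberOfRoutes_spec : Claim_equal_numberOfRoutes := by
  intro grid d hdom hpre
  obtain ⟨hne, hm1, hrows, hd0, hd2⟩ := hpre
  unfold Spec_numberOfRoutes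
  simp only [numberOfRoutes, numberOfRoutes_alt]
  cases grid with
  | nil => exact absurd rfl hne
  | cons g gs =>
    simp only [List.headD_cons] at hm1
    have hget : (PySem.List.pyGet? (g :: gs) 0).getD "" = g := by simp
    rw [hget]
    set m := (PySem.Str.len g).toNat with hmdef
    have hm : 1 ≤ m := by
      have := PySem.Str.len_eq g
      omega
    obtain ⟨r0, rest, hrev⟩ := List.exists_cons_of_ne_nil
      (show (g :: gs).reverse ≠ [] by simp)
    rw [hrev]
    simp only [List.foldl_cons]
    rw [pvf_eq m (List.replicate m 1) 0 r0 le_rfl (by simp) hm,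
        pvf_eq m _ d r0 hd0 (pvB_f_len m _ _ _) hm,
        pv_outer m d hd0 hm rest _ (pvB_f_len m _ _ _)]
    rfl
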